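-- pv_equiv track=rewrite | github.com/AlCorreia/FABIR | utils.py | get_word_span
-- ===== SOURCE A (Python) =====
-- def get_word_span(context, spans, start, stop):
-- 	search_index = 0
-- 	word_id = []
-- 	word_index=[]
-- 	for word_idx, word in  enumerate(spans):
-- 		word_init = context.find(word, search_index)
-- 		assert word_init >= 0
-- 		word_end = word_init + len(word)
-- 		if  (stop > word_init and start < word_end):
-- 			word_id.append(word_idx)
-- 			word_index.append([word_init, word_end])
-- 		search_index=word_end
--
-- 	assert len(word_id) > 0, "{} {} {} {}".format(context, spans, start, stop)
-- 	return word_id[0], (word_id[-1] + 1), word_index[0][0], word_index[-1][0]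
-- ===== SOURCE B (Python) =====
-- def get_word_span(context, spans, start, stop):
--     # Locate every word once (keeping A's per-word assert), recording inits and ends.
--     search_index = 0
--     inits = []
--     ends = []
--     for word in spans:
--         word_init = context.find(word, search_index)
--         assert word_init >= 0
--         word_end = word_init + len(word)
--         inits.append(word_init)
--         ends.append(word_end)
--         search_index = word_end
--     # The words are laid out left to right (each init >= previous end), so inits and
--     # ends are nondecreasing and the overlapping words form one contiguous block:
--     # binary-search its two boundaries instead of scanning.
--     n = len(spans)
--     lo, hi = 0, n               # least index with ends[i] > start
--     while lo < hi:
--         mid = (lo + hi) // 2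
--         if ends[mid] > start:
--             hi = mid
--         else:
--             lo = mid + 1
--     first = lo
--     lo, hi = 0, n               # least index with inits[i] >= stop
--     while lo < hi:
--         mid = (lo + hi) // 2
--         if inits[mid] >= stop:
--             hi = mid
--         else:
--             lo = mid + 1
--     last = lo - 1
--     assert first <= last, "{} {} {} {}".format(context, spans, start, stop)
--     return first, last + 1, inits[first], inits[last]
-- ===== Notes on version B (the rewrite author's own statement) =====
-- stated objective: alternative
-- what changed: A accumulates parallel word_id/word_index lists of every overlapping word in one scan; B locates all words into inits/ends tables and then, because the words are laid out left to right so the overlapping words form one contiguous block, binary-searches the block's two boundaries instead of scanning for them.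
import Mathlib
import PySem

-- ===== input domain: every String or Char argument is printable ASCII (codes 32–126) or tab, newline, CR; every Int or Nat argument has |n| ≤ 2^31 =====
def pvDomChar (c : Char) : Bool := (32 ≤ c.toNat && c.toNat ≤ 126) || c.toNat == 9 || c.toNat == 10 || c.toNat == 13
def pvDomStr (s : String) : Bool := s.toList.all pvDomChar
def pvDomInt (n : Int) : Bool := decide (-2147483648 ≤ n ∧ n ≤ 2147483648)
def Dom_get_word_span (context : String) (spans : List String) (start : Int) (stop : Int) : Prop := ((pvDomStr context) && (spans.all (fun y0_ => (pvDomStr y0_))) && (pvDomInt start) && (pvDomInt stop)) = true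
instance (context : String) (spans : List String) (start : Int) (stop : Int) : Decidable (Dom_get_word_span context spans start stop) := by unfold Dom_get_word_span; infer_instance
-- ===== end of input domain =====

-- B exploits that the located words are laid out left to right, so the overlapping words form one
-- contiguous block: after locating all words it binary-searches the block's two boundaries instead
-- of scanning and accumulating; alternative algorithm, overall cost still dominated by the finds.

-- ===== PORT A =====
def get_word_span (context : String) (spans : List String) (start : Int) (stop : Int) : Int × Int × Int × Int :=
  let r := (PySem.List.enumerate spans 0).foldl
    (fun (st : Int × List Int × List (Int × Int)) (p : Int × String) =>
      let word_init := PySem.Str.findFrom context p.2 st.1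
      let word_end := word_init + PySem.Str.len p.2
      if stop > word_init ∧ start < word_end then
        (word_end, st.2.1 ++ [p.1], st.2.2 ++ [(word_init, word_end)])
      else (word_end, st.2.1, st.2.2))
    ((0 : Int), ([] : List Int), ([] : List (Int × Int)))
  -- word_id[0] / word_id[-1] / word_index[0][0] / word_index[-1][0]; under Pre_ the lists are
  -- nonempty (otherwise Python's assert fires), so the defaults are never used there
  (r.2.1.headD 0, r.2.1.getLastD 0 + 1, (r.2.2.headD (0, 0)).1, (r.2.2.getLastD (0, 0)).1)

-- ===== PORT B =====
-- Source B's first loop: the two tables inits / ends, one entry per word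
def gwsLocate (context : String) : List String → Int → List Int × List Int
  | [], _ => ([], [])
  | w :: ws, si =>
      let i := PySem.Str.findFrom context w si
      let e := i + PySem.Str.len w
      let r := gwsLocate context ws e
      (i :: r.1, e :: r.2)

-- Source B's while-loop pattern: least idx in [lo, hi) whose entry satisfies p (hi if none)
def gwsBsearch (xs : List Int) (p : Int → Bool) (lo hi : Int) : Int :=
  if _h : lo < hi then
    let mid := PySem.Int.floordiv (lo + hi) 2
    if p (PySem.List.pyGetD xs mid 0) then gwsBsearch xs p lo mid
    else gwsBsearch xs p (mid + 1) hi
  else lo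
termination_by (hi - lo).toNat
decreasing_by
  · have := PySem.Int.floordiv_two_mid_bounds (le_of_lt _h)
    rw [PySem.Int.floordiv_eq_ediv_of_pos (by omega : (0:Int) < 2)] at *
    omega
  · have := PySem.Int.floordiv_two_mid_bounds (le_of_lt _h)
    rw [PySem.Int.floordiv_eq_ediv_of_pos (by omega : (0:Int) < 2)] at *
    omega

def get_word_span_alt (context : String) (spans : List String) (start : Int) (stop : Int) : Int × Int × Int × Int :=
  let r := gwsLocate context spans 0
  let inits := r.1
  let ends := r.2
  let n : Int := (spans.length : Int)
  let first := gwsBsearch ends (fun e => decide (e > start)) 0 n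
  let last := gwsBsearch inits (fun i => decide (i ≥ stop)) 0 n - 1
  -- inits[first] / inits[last]: in range under Pre_ (the asserts fire otherwise)
  (first, last + 1, PySem.List.pyGetD inits first 0, PySem.List.pyGetD inits last 0)

-- ===== PRECONDITION & SPEC =====
-- Pre_ excludes exactly the inputs on which Python A raises AssertionError: some word is not
-- found at/after the running search index, or no word overlaps [start, stop).  The running
-- search index is inherently sequential, so the check is a scan over the words.
def gwsPreB (context : String) (start stop : Int) : List String → Int → Bool → Bool
  | [], _, found => found
  | w :: ws, si, found =>
      let i := PySem.Str.findFrom context w si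
      let e := i + PySem.Str.len w
      decide (0 ≤ i) && gwsPreB context start stop ws e (found || (decide (i < stop) && decide (start < e)))

def Pre_get_word_span (context : String) (spans : List String) (start : Int) (stop : Int) : Prop :=
  gwsPreB context start stop spans 0 false = true
instance (context : String) (spans : List String) (start : Int) (stop : Int) : Decidable (Pre_get_word_span context spans start stop) := by unfold Pre_get_word_span; infer_instance

def pvWitness_get_word_span : String × List String × Int × Int := ("ab c", ["ab", "c"], 0, 2)

def Spec_get_word_span (context : String) (spans : List String) (start : Int) (stop : Int) (out : Int × Int × Int × Int) : Prop := out = get_word_span_alt context spans start stop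
instance (context : String) (spans : List String) (start : Int) (stop : Int) (out : Int × Int × Int × Int) : Decidable (Spec_get_word_span context spans start stop out) := by unfold Spec_get_word_span; infer_instance

-- ===== CLAIM (what is proved, stated in full; the proofs are below) =====
def Claim_equal_get_word_span : Prop := ∀ (context : String) (spans : List String) (start : Int) (stop : Int), Dom_get_word_span context spans start stop → Pre_get_word_span context spans start stop → Spec_get_word_span context spans start stop (get_word_span context spans start stop)

-- ===== LEMMAS AND PROOFS =====

-- the (init, end) table both programs implicitly compute, as one list of pairs
def gwsPositions (context : String) : List String → Int → List (Int × Int)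
  | [], _ => []
  | w :: ws, si =>
      let i := PySem.Str.findFrom context w si
      let e := i + PySem.Str.len w
      (i, e) :: gwsPositions context ws e

-- the overlapping entries of the enumerated positions table
def gwsMatched (start stop : Int) (l : List (Int × (Int × Int))) : List (Int × (Int × Int)) :=
  l.filter (fun t => decide (stop > t.2.1 ∧ start < t.2.2))

-- the final search index of A's loop
def gwsFinEnd (context : String) : List String → Int → Int
  | [], si => si
  | w :: ws, si => gwsFinEnd context ws (PySem.Str.findFrom context w si + PySem.Str.len w)

lemma foldA_eq (context : String) (start stop : Int) :
    ∀ (ws : List String) (k : Int) (si : Int) (ids : List Int) (idxs : List (Int × Int)),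
    (PySem.List.enumerate ws k).foldl
      (fun (st : Int × List Int × List (Int × Int)) (p : Int × String) =>
        let word_init := PySem.Str.findFrom context p.2 st.1
        let word_end := word_init + PySem.Str.len p.2
        if stop > word_init ∧ start < word_end then
          (word_end, st.2.1 ++ [p.1], st.2.2 ++ [(word_init, word_end)])
        else (word_end, st.2.1, st.2.2))
      (si, ids, idxs)
    = (gwsFinEnd context ws si,
       ids ++ (gwsMatched start stop (PySem.List.enumerate (gwsPositions context ws si) k)).map (·.1),
       idxs ++ (gwsMatched start stop (PySem.List.enumerate (gwsPositions context ws si) k)).map (·.2))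
  | [], k, si, ids, idxs => by
      simp [PySem.List.enumerate_nil, gwsPositions, gwsMatched, gwsFinEnd]
  | w :: ws, k, si, ids, idxs => by
      rw [PySem.List.enumerate_cons]
      simp only [List.foldl_cons]
      by_cases h : stop > PySem.Str.findFrom context w si ∧
          start < PySem.Str.findFrom context w si + PySem.Str.len w
      · simp only [h, gwsPositions, gwsFinEnd]
        rw [foldA_eq context start stop ws (k + 1) _ _ _]
        rw [PySem.List.enumerate_cons]
        have h' : PySem.Chars.findFrom context.toList w.toList si < stop ∧
            start < PySem.Chars.findFrom context.toList w.toList si + (w.length : Int) := by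
          simpa using h
        simp [gwsMatched, h']
      · simp only [h, if_neg, not_false_iff, gwsPositions, gwsFinEnd]
        rw [foldA_eq context start stop ws (k + 1) _ _ _]
        rw [PySem.List.enumerate_cons]
        have h' : ¬(PySem.Chars.findFrom context.toList w.toList si < stop ∧
            start < PySem.Chars.findFrom context.toList w.toList si + (w.length : Int)) := by
          simpa using h
        simp [gwsMatched, h']

-- gwsLocate is the unzip of gwsPositions
lemma locate_eq (context : String) :
    ∀ (ws : List String) (si : Int),
    gwsLocate context ws si
      = ((gwsPositions context ws si).map (·.1), (gwsPositions context ws si).map (·.2))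
  | [], si => by simp [gwsLocate, gwsPositions]
  | w :: ws, si => by
      simp only [gwsLocate, gwsPositions, locate_eq context ws, List.map_cons]

lemma length_positions (context : String) :
    ∀ (ws : List String) (si : Int), (gwsPositions context ws si).length = ws.length
  | [], _ => rfl
  | w :: ws, si => by simp [gwsPositions, length_positions context ws]

-- PySem.Chars.find returns -1 or a nonnegative index
lemma find_go_cases (sub : List Char) :
    ∀ (s : List Char) (k : Nat),
    PySem.Chars.find.go sub s k = -1 ∨ 0 ≤ PySem.Chars.find.go sub s k
  | [], k => by
      unfold PySem.Chars.find.go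
      split <;> simp
  | c :: t, k => by
      unfold PySem.Chars.find.go
      split
      · right; positivity
      · exact find_go_cases sub t (k + 1)

lemma find_cases (s sub : List Char) :
    PySem.Chars.find s sub = -1 ∨ 0 ≤ PySem.Chars.find s sub :=
  find_go_cases sub s 0
lemma str_len_nonneg (w : String) : (0:Int) ≤ PySem.Str.len w := by
  simp [PySem.Str.len_eq]

lemma findFrom_ge (s sub : List Char) (si : Int) (h0 : 0 ≤ si)
    (hf : 0 ≤ PySem.Chars.findFrom s sub si) : si ≤ PySem.Chars.findFrom s sub si := by
  unfold PySem.Chars.findFrom at hf ⊢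
  simp only [] at hf ⊢
  have hcases := find_cases (List.drop (if si < 0 then if si + (s.length:Int) < 0 then 0 else si + (s.length:Int) else si).toNat (List.take ((s.length:Int)).toNat s)) sub
  rw [if_neg (by omega : ¬ si < 0)] at hcases
  split_ifs at hf ⊢ <;> omega
-- the layout invariant: each word starts at or after the previous word's end
def gwsChain : Int → List (Int × Int) → Prop
  | _, [] => True
  | si, q :: rest => si ≤ q.1 ∧ q.1 ≤ q.2 ∧ gwsChain q.2 rest

lemma chain_of_found (context : String) :
    ∀ (ws : List String) (si : Int), 0 ≤ si →
    (∀ q ∈ gwsPositions context ws si, 0 ≤ q.1) →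
    gwsChain si (gwsPositions context ws si)
  | [], si, _, _ => by simp [gwsPositions, gwsChain]
  | w :: ws, si, h0, hall => by
      simp only [gwsPositions, gwsChain]
      have hi : 0 ≤ PySem.Str.findFrom context w si := by
        have := hall (PySem.Str.findFrom context w si,
          PySem.Str.findFrom context w si + PySem.Str.len w) (by simp [gwsPositions])
        exact this
      have hge : si ≤ PySem.Str.findFrom context w si := by
        have := findFrom_ge context.toList w.toList si h0 (by simpa using hi)
        simpa using this
      have hlen := str_len_nonneg w
      refine ⟨hge, by omega, ?_⟩
      exact chain_of_found context ws _ (by omega)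
        (fun q hq => hall q (by simp [gwsPositions]; right; exact hq))
lemma chain_ge_start :
    ∀ (P : List (Int × Int)) (si : Int), gwsChain si P →
    ∀ (k : Nat) (hk : k < P.length), si ≤ P[k].1 ∧ P[k].1 ≤ P[k].2
  | [], si, _, k, hk => by simp at hk
  | q :: rest, si, h, 0, hk => ⟨h.1, h.2.1⟩
  | q :: rest, si, h, k + 1, hk => by
      have := chain_ge_start rest q.2 h.2.2 k (by simpa using hk)
      have h1 := h.1; have h2 := h.2.1
      simp only [List.getElem_cons_succ]
      omega
lemma chain_le :
    ∀ (P : List (Int × Int)) (si : Int), gwsChain si P →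
    ∀ (j k : Nat), j ≤ k → (hj : j < P.length) → (hk : k < P.length) →
    P[j].1 ≤ P[k].1 ∧ P[j].2 ≤ P[k].2
  | [], si, _, j, k, _, hj, _ => by simp at hj
  | q :: rest, si, h, 0, 0, _, _, _ => ⟨le_refl _, le_refl _⟩
  | q :: rest, si, h, 0, k + 1, _, _, hk => by
      have := chain_ge_start rest q.2 h.2.2 k (by simpa using hk)
      have h1 := h.2.1
      simp only [List.getElem_cons_succ, List.getElem_cons_zero]
      constructor <;> omega
  | q :: rest, si, h, j + 1, k + 1, hjk, hj, hk => by
      have := chain_le rest q.2 h.2.2 j k (by omega) (by simpa using hj) (by simpa using hk)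
      simpa using this
-- what Pre_ yields: every word was found, and some word overlaps
lemma pre_unfold (context : String) (start stop : Int) :
    ∀ (ws : List String) (si : Int) (found : Bool),
    gwsPreB context start stop ws si found = true →
    (∀ q ∈ gwsPositions context ws si, 0 ≤ q.1) ∧
    (found = true ∨ ∃ q ∈ gwsPositions context ws si, q.1 < stop ∧ start < q.2)
  | [], si, found, h => by
      simp [gwsPreB] at h
      exact ⟨by simp [gwsPositions], Or.inl h⟩
  | w :: ws, si, found, h => by
      simp only [gwsPreB, Bool.and_eq_true, decide_eq_true_eq] at h
      obtain ⟨hi, hrec⟩ := h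
      have IH := pre_unfold context start stop ws _ _ hrec
      constructor
      · intro q hq
        simp only [gwsPositions, List.mem_cons] at hq
        rcases hq with rfl | hq
        · exact hi
        · exact IH.1 q hq
      · rcases IH.2 with hf | ⟨q, hq, hov⟩
        · simp only [Bool.or_eq_true, Bool.and_eq_true, decide_eq_true_eq] at hf
          rcases hf with hf | ⟨h1, h2⟩
          · exact Or.inl hf
          · right
            refine ⟨(PySem.Str.findFrom context w si,
              PySem.Str.findFrom context w si + PySem.Str.len w), ?_, h1, h2⟩
            simp [gwsPositions]
        · exact Or.inr ⟨q, by simp [gwsPositions]; right; exact hq, hov⟩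
-- binary-search boundary: on a p-monotone table, gwsBsearch finds the least satisfying index
lemma bsearch_inv (xs : List Int) (p : Int → Bool)
    (mono : ∀ j k : Int, 0 ≤ j → j ≤ k → k < (xs.length : Int) →
      p (PySem.List.pyGetD xs j 0) = true → p (PySem.List.pyGetD xs k 0) = true) :
    ∀ (d : Nat) (lo hi : Int), (hi - lo).toNat = d → 0 ≤ lo → lo ≤ hi → hi ≤ (xs.length : Int) →
    lo ≤ gwsBsearch xs p lo hi ∧ gwsBsearch xs p lo hi ≤ hi ∧
    (∀ j : Int, lo ≤ j → j < gwsBsearch xs p lo hi → p (PySem.List.pyGetD xs j 0) = false) ∧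
    (∀ j : Int, gwsBsearch xs p lo hi ≤ j → j < hi → p (PySem.List.pyGetD xs j 0) = true) := by
  intro d
  induction d using Nat.strong_induction_on with
  | _ d IH =>
    intro lo hi hd h0 hlh hhi
    by_cases hlt : lo < hi
    · have hmid := PySem.Int.floordiv_two_mid_bounds (le_of_lt hlt)
      have hmid2 : PySem.Int.floordiv (lo + hi) 2 < hi := by
        rw [PySem.Int.floordiv_eq_ediv_of_pos (by omega : (0:Int) < 2)]; omega
      rw [show gwsBsearch xs p lo hi =
          (if p (PySem.List.pyGetD xs (PySem.Int.floordiv (lo + hi) 2) 0)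
           then gwsBsearch xs p lo (PySem.Int.floordiv (lo + hi) 2)
           else gwsBsearch xs p (PySem.Int.floordiv (lo + hi) 2 + 1) hi) from by
        rw [gwsBsearch]; simp only [dif_pos hlt]]
      set mid := PySem.Int.floordiv (lo + hi) 2 with hmiddef
      by_cases hp : p (PySem.List.pyGetD xs mid 0) = true
      · rw [if_pos hp]
        obtain ⟨b1, b2, b3, b4⟩ := IH (mid - lo).toNat (by omega) lo mid rfl h0 hmid.1 (by omega)
        refine ⟨b1, by omega, b3, ?_⟩
        intro j hj1 hj2
        by_cases hjm : j < mid
        · exact b4 j hj1 hjm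
        · exact mono mid j (by omega) (by omega) (by omega) hp
      · rw [if_neg hp]
        obtain ⟨b1, b2, b3, b4⟩ := IH (hi - (mid + 1)).toNat (by omega) (mid + 1) hi rfl (by omega) (by omega) hhi
        refine ⟨by omega, b2, ?_, b4⟩
        intro j hj1 hj2
        by_cases hjm : mid + 1 ≤ j
        · exact b3 j hjm hj2
        · by_contra hc
          have hpj : p (PySem.List.pyGetD xs j 0) = true := by
            cases hx : p (PySem.List.pyGetD xs j 0)
            · exact absurd hx hc
            · rfl
          exact hp (mono j mid (by omega) (by omega) (by omega) hpj)
    · rw [show gwsBsearch xs p lo hi = lo from by rw [gwsBsearch]; simp [hlt]]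
      exact ⟨le_refl _, hlh, fun j h1 h2 => absurd (lt_of_le_of_lt h1 h2) (lt_irrefl _),
        fun j h1 h2 => absurd (lt_of_le_of_lt h1 h2) (by omega)⟩
-- the filter of an enumerated list by an index interval: its head and last
lemma filter_enum_nil {T : Type} (q : Int × T → Bool) (P : List T) (s : Int)
    (hq : ∀ (k : Nat) (hk : k < P.length), q ((s + (k : Int)), P[k]) = false) :
    (PySem.List.enumerate P s).filter q = [] := by
  apply List.filter_eq_nil_iff.mpr
  intro t ht
  rcases (PySem.List.mem_enumerate_iff P s t).mp ht with ⟨k, hk, rfl⟩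
  simp [hq k hk]

lemma filter_enum_prefix {T : Type} (q : Int × T → Bool) :
    ∀ (P : List T) (s g : Int)
    (hq : ∀ (k : Nat) (hk : k < P.length), q ((s + (k : Int)), P[k]) = decide (s + (k : Int) < g))
    (hsg : s < g) (hg : g ≤ s + (P.length : Int)),
    ((PySem.List.enumerate P s).filter q).head? = some (s, P[0]'(by omega)) ∧
    ((PySem.List.enumerate P s).filter q).getLast? = some (g - 1, P[(g - 1 - s).toNat]'(by omega))
  | [], s, g, _hq, hsg, hg => by simp at hg; omega
  | x :: tail, s, g, hq, hsg, hg => by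
      have hlen : ((x :: tail).length : Int) = (tail.length : Int) + 1 := by
        simp
      have hqt : ∀ (k : Nat) (hk : k < tail.length),
          q ((s + 1 + (k : Int)), tail[k]) = decide (s + 1 + (k : Int) < g) := by
        intro k hk
        have := hq (k + 1) (by simp; omega)
        simp only [List.getElem_cons_succ] at this
        rw [show ((( k + 1 : Nat)) : Int) = (k : Int) + 1 by omega] at this
        rw [show s + ((k : Int) + 1) = s + 1 + (k : Int) by ring] at this
        exact this
      rw [PySem.List.enumerate_cons]
      have h0 : q (s, x) = true := by
        have := hq 0 (by simp)
        simpa [hsg] using this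
      rw [List.filter_cons, if_pos h0]
      by_cases hge : g = s + 1
      · have hnil : (PySem.List.enumerate tail (s + 1)).filter q = [] := by
          apply filter_enum_nil
          intro k hk
          have := hqt k hk
          have hx : ¬ (s + 1 + (k : Int) < g) := by omega
          simpa [hx] using this
        subst hge
        simp [hnil]
      · have hIH := filter_enum_prefix q tail (s + 1) g hqt (by omega)
          (by rw [hlen] at hg; omega)
        have hne : (PySem.List.enumerate tail (s + 1)).filter q ≠ [] := by
          intro hnil; rw [hnil] at hIH; simp at hIH
        refine ⟨by simp, ?_⟩
        rw [List.getLast?_cons, hIH.2]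
        have hidx : (g - 1 - s).toNat = (g - 1 - (s + 1)).toNat + 1 := by omega
        simp only [Option.getD_some, Option.some.injEq]
        refine Prod.ext rfl ?_
        simp only [hidx, List.getElem_cons_succ]

lemma filter_enum_interval {T : Type} (q : Int × T → Bool) :
    ∀ (P : List T) (s f g : Int)
    (hq : ∀ (k : Nat) (hk : k < P.length), q ((s + (k : Int)), P[k]) = decide (f ≤ s + (k : Int) ∧ s + (k : Int) < g))
    (hsf : s ≤ f) (hfg : f < g) (hg : g ≤ s + (P.length : Int)),
    ((PySem.List.enumerate P s).filter q).head? = some (f, P[(f - s).toNat]'(by omega)) ∧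
    ((PySem.List.enumerate P s).filter q).getLast? = some (g - 1, P[(g - 1 - s).toNat]'(by omega))
  | [], s, f, g, _hq, hsf, hfg, hg => by simp at hg; omega
  | x :: tail, s, f, g, hq, hsf, hfg, hg => by
      have hlen : ((x :: tail).length : Int) = (tail.length : Int) + 1 := by simp
      have hqt : ∀ (k : Nat) (hk : k < tail.length),
          q ((s + 1 + (k : Int)), tail[k]) = decide (f ≤ s + 1 + (k : Int) ∧ s + 1 + (k : Int) < g) := by
        intro k hk
        have := hq (k + 1) (by simp; omega)
        simp only [List.getElem_cons_succ] at this
        rw [show (((k + 1 : Nat)) : Int) = (k : Int) + 1 by omega] at this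
        rw [show s + ((k : Int) + 1) = s + 1 + (k : Int) by ring] at this
        exact this
      by_cases hfs : f = s
      · subst hfs
        have hq' : ∀ (k : Nat) (hk : k < (x :: tail).length),
            q ((f + (k : Int)), (x :: tail)[k]) = decide (f + (k : Int) < g) := by
          intro k hk
          have := hq k hk
          have : q (f + (k : Int), (x :: tail)[k]) = decide (f ≤ f + (k : Int) ∧ f + (k : Int) < g) := this
          rw [this]
          have hle : f ≤ f + (k : Int) := by omega
          simp [hle]
        have := filter_enum_prefix q (x :: tail) f g hq' hfg (by omega)
        simpa using this
      · have hf0 : q (s, x) = false := by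
          have := hq 0 (by simp)
          have hx : ¬ (f ≤ s) := by omega
          simpa [hx] using this
        rw [PySem.List.enumerate_cons, List.filter_cons, if_neg (by simp [hf0])]
        have hIH := filter_enum_interval q tail (s + 1) f g hqt (by omega) hfg
          (by rw [hlen] at hg; omega)
        have hidx1 : (f - s).toNat = (f - (s + 1)).toNat + 1 := by omega
        have hidx2 : (g - 1 - s).toNat = (g - 1 - (s + 1)).toNat + 1 := by omega
        refine ⟨?_, ?_⟩
        · rw [hIH.1]
          simp only [hidx1, List.getElem_cons_succ]
        · rw [hIH.2]
          simp only [hidx2, List.getElem_cons_succ]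
lemma main_eq (context : String) (spans : List String) (start stop : Int)
    (hpre : Pre_get_word_span context spans start stop) :
    get_word_span context spans start stop = get_word_span_alt context spans start stop := by
  have hpre' := pre_unfold context start stop spans 0 false hpre
  have hall := hpre'.1
  have hov : ∃ q ∈ gwsPositions context spans 0, q.1 < stop ∧ start < q.2 := by
    rcases hpre'.2 with h | h
    · exact absurd h (by simp)
    · exact h
  set P := gwsPositions context spans 0 with hP
  have hchain : gwsChain 0 P := chain_of_found context spans 0 le_rfl hall
  have hlenP : P.length = spans.length := length_positions context spans 0
  set inits := P.map (fun t => t.1) with hinits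
  set ends := P.map (fun t => t.2) with hends
  have hleni : inits.length = P.length := by simp [hinits]
  have hlene : ends.length = P.length := by simp [hends]
  -- pyGetD on the two tables, inside range
  have hgeti : ∀ (j : Int) (h1 : 0 ≤ j) (h2 : j < (P.length : Int)),
      PySem.List.pyGetD inits j 0 = (P[j.toNat]'(by omega)).1 := by
    intro j h1 h2
    rw [PySem.List.pyGetD_of_nonneg inits 0 h1]
    rw [List.getD_eq_getElem?_getD, List.getElem?_eq_getElem (by omega : j.toNat < inits.length)]
    simp [hinits]
  have hgete : ∀ (j : Int) (h1 : 0 ≤ j) (h2 : j < (P.length : Int)),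
      PySem.List.pyGetD ends j 0 = (P[j.toNat]'(by omega)).2 := by
    intro j h1 h2
    rw [PySem.List.pyGetD_of_nonneg ends 0 h1]
    rw [List.getD_eq_getElem?_getD, List.getElem?_eq_getElem (by omega : j.toNat < ends.length)]
    simp [hends]
  -- the two binary searches and their boundary facts
  have hmono1 : ∀ j k : Int, 0 ≤ j → j ≤ k → k < (ends.length : Int) →
      (fun e => decide (e > start)) (PySem.List.pyGetD ends j 0) = true →
      (fun e => decide (e > start)) (PySem.List.pyGetD ends k 0) = true := by
    intro j k h1 h2 h3 hpj
    rw [hlene] at h3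
    rw [hgete j h1 (by omega)] at hpj
    rw [hgete k (by omega) (by omega)]
    have := chain_le P 0 hchain j.toNat k.toNat (by omega) (by omega) (by omega)
    simp only [decide_eq_true_eq] at hpj ⊢
    omega
  have hmono2 : ∀ j k : Int, 0 ≤ j → j ≤ k → k < (inits.length : Int) →
      (fun i => decide (i ≥ stop)) (PySem.List.pyGetD inits j 0) = true →
      (fun i => decide (i ≥ stop)) (PySem.List.pyGetD inits k 0) = true := by
    intro j k h1 h2 h3 hpj
    rw [hleni] at h3
    rw [hgeti j h1 (by omega)] at hpj
    rw [hgeti k (by omega) (by omega)]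
    have := chain_le P 0 hchain j.toNat k.toNat (by omega) (by omega) (by omega)
    simp only [decide_eq_true_eq] at hpj ⊢
    omega
  obtain ⟨a1, a2, a3, a4⟩ := bsearch_inv ends (fun e => decide (e > start)) hmono1
    (((spans.length : Int) - 0).toNat) 0 (spans.length : Int) rfl le_rfl (by omega)
    (by rw [hlene, hlenP])
  obtain ⟨c1, c2, c3, c4⟩ := bsearch_inv inits (fun i => decide (i ≥ stop)) hmono2
    (((spans.length : Int) - 0).toNat) 0 (spans.length : Int) rfl le_rfl (by omega)
    (by rw [hleni, hlenP])
  set r1 := gwsBsearch ends (fun e => decide (e > start)) 0 (spans.length : Int) with hr1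
  set r2 := gwsBsearch inits (fun i => decide (i ≥ stop)) 0 (spans.length : Int) with hr2
  -- index k overlaps iff r1 ≤ k < r2
  have hiff : ∀ (k : Nat) (hk : k < P.length),
      ((stop > (P[k]'hk).1 ∧ start < (P[k]'hk).2) ↔ (r1 ≤ (k : Int) ∧ (k : Int) < r2)) := by
    intro k hk
    constructor
    · rintro ⟨hk1, hk2⟩
      constructor
      · by_contra hlt
        have := a3 (k : Int) (by omega) (by omega)
        rw [hgete (k : Int) (by omega) (by omega)] at this
        simp at this
        omega
      · by_contra hge
        have := c4 (k : Int) (by omega) (by omega)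
        rw [hgeti (k : Int) (by omega) (by omega)] at this
        simp at this
        omega
    · rintro ⟨hk1, hk2⟩
      constructor
      · have := c3 (k : Int) (by omega) (by omega)
        rw [hgeti (k : Int) (by omega) (by omega)] at this
        simp at this
        omega
      · have := a4 (k : Int) (by omega) (by omega)
        rw [hgete (k : Int) (by omega) (by omega)] at this
        simp at this
        omega
  -- the matched block is nonempty: r1 < r2
  have hr12 : r1 < r2 := by
    rcases hov with ⟨q, hq, hq1, hq2⟩
    rcases List.mem_iff_getElem.mp hq with ⟨k, hk, rfl⟩
    have := (hiff k hk).mp ⟨hq1, hq2⟩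
    omega
  -- head and last of A's matched list
  have hmatched := filter_enum_interval (fun t => decide (stop > t.2.1 ∧ start < t.2.2))
    P 0 r1 r2
    (by
      intro k hk
      have := hiff k hk
      simp only [zero_add]
      rw [decide_eq_decide]
      exact this)
    a1 hr12 (by omega)
  -- evaluate A
  rw [show get_word_span context spans start stop =
      ((gwsMatched start stop (PySem.List.enumerate P 0)).map (·.1) |>.headD 0,
       ((gwsMatched start stop (PySem.List.enumerate P 0)).map (·.1) |>.getLastD 0) + 1,
       ((gwsMatched start stop (PySem.List.enumerate P 0)).map (·.2) |>.headD (0, 0)).1,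
       ((gwsMatched start stop (PySem.List.enumerate P 0)).map (·.2) |>.getLastD (0, 0)).1) from by
    unfold get_word_span
    rw [foldA_eq context start stop spans 0 0 [] []]
    simp [hP]]
  unfold gwsMatched at *
  rw [show (PySem.List.enumerate P 0).filter (fun t => decide (stop > t.2.1 ∧ start < t.2.2))
      = ((PySem.List.enumerate P 0).filter (fun t => decide (stop > t.2.1 ∧ start < t.2.2))) from rfl]
  -- evaluate B
  unfold get_word_span_alt
  rw [locate_eq context spans 0]
  simp only [← hP, ← hinits, ← hends, ← hr1, ← hr2]
  -- rewrite both sides using the head/last facts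
  have hh := hmatched.1
  have hl := hmatched.2
  rw [List.headD_eq_head?_getD, List.head?_map, hh]
  rw [List.getLastD_eq_getLast?, List.getLast?_map, hl]
  rw [List.headD_eq_head?_getD, List.head?_map, hh]
  rw [List.getLastD_eq_getLast?, List.getLast?_map, hl]
  simp only [Option.map_some, Option.getD_some]
  rw [hgeti r1 a1 (by omega), hgeti (r2 - 1) (by omega) (by omega)]
  have e1 : (r1 - 0).toNat = r1.toNat := by omega
  have e2 : (r2 - 1 - 0).toNat = (r2 - 1).toNat := by omega
  simp only [e1, e2]

-- ===== VERDICT (by name: the statement is the Claim_ definition above) =====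
theorem get_word_span_spec : Claim_equal_get_word_span := by
  intro context spans start stop _ hpre
  unfold Spec_get_word_span
  exact main_eq context spans start stop hpre
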